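-- pv_equiv track=rewrite | github.com/suzannejin/nf_homoplasty | bin/pastml/count_transitions.py | cols2transition
-- ===== SOURCE A (Python) =====
-- def cols2transition(cols):
--     trans={}
--     for n in range(len(cols)):
--         col=cols[n]
--         trans[n]=0
--         for i in range(1,len(col)):
--             prev,current=col[i-1],col[i]
--             if current!=prev:
--                 trans[n]+=1
--     return(trans)
-- ===== SOURCE B (Python) =====
-- def cols2transition(cols):
--     # Row-major traversal: sweep depth levels once, rebuilding a vector of
--     # per-column counters at each level instead of looping inside each column.
--     depth = max(map(len, cols), default=0)
--     counts = [0] * len(cols)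
--     for i in range(1, depth):
--         counts = [c + (1 if i < len(col) and col[i] != col[i - 1] else 0)
--                   for c, col in zip(counts, cols)]
--     return dict(enumerate(counts))
-- ===== Notes on version B (the rewrite author's own statement) =====
-- stated objective: alternative
-- what changed: B swaps the traversal order: instead of A's per-column inner loop over adjacent indices, it sweeps the matrix row by row (levels 1..depth-1), rebuilding a whole vector of per-column counters at each level with a zip comprehension, then packs it with dict(enumerate(...)).
import Mathlib
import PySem

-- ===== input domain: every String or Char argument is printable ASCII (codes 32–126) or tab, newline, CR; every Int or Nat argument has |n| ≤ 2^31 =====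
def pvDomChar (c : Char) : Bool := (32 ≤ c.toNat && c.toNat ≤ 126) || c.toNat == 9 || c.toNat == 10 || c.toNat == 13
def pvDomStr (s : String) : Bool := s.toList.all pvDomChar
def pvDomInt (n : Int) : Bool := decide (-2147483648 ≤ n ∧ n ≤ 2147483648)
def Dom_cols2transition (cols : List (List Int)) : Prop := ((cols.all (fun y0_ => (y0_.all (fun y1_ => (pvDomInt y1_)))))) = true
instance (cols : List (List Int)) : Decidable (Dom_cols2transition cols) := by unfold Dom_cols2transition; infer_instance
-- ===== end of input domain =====

-- B replaces A's per-column inner loops with a row-major sweep that rebuilds a vector of per-column counters at each level; alternative traversal, same values.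

-- ===== PORT A =====
-- literal transliteration of A: dict keyed by column index, inner index loop comparing col[i-1] with col[i]
def cols2transition (cols : List (List Int)) : List (Int × Int) :=
  (((PySem.List.pyRange 0 (PySem.List.len cols) 1).foldl
    (fun (trans : PySem.Dict Int Int) n =>
      let col := PySem.List.pyGetD cols n []
      let trans := trans.insert n 0
      (PySem.List.pyRange 1 (PySem.List.len col) 1).foldl
        (fun t i =>
          let prev := PySem.List.pyGetD col (i - 1) 0
          let current := PySem.List.pyGetD col i 0
          if current ≠ prev then t.insert n (t.getD n 0 + 1) else t)
        trans)
    PySem.Dict.empty)).items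

-- ===== PORT B =====
-- transliteration of Source B: depth = max(map(len, cols), default=0); counts vector rebuilt per level i
def cols2transition_alt (cols : List (List Int)) : List (Int × Int) :=
  let depth := (PySem.List.max? (cols.map PySem.List.len) (fun x => x)).getD 0
  let counts := List.replicate cols.length (0 : Int)
  let counts :=
    (PySem.List.pyRange 1 depth 1).foldl
      (fun (counts : List Int) i =>
        (counts.zip cols).map (fun p =>
          p.1 + (if i < PySem.List.len p.2 ∧
                    PySem.List.pyGetD p.2 i 0 ≠ PySem.List.pyGetD p.2 (i - 1) 0
                 then 1 else 0)))
      counts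
  PySem.List.enumerate counts 0

-- ===== PRECONDITION & SPEC =====
def Spec_cols2transition (cols : List (List Int)) (out : List (Int × Int)) : Prop := out = cols2transition_alt cols
instance (cols : List (List Int)) (out : List (Int × Int)) : Decidable (Spec_cols2transition cols out) := by unfold Spec_cols2transition; infer_instance

-- ===== CLAIM (what is proved, stated in full; the proofs are below) =====
def Claim_equal_cols2transition : Prop := ∀ (cols : List (List Int)), Dom_cols2transition cols → Spec_cols2transition cols (cols2transition cols)

-- ===== LEMMAS AND PROOFS =====

-- number of adjacent differing pairs, structurally
def pvDiffs : List Int → Nat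
  | a :: b :: t => (if b ≠ a then 1 else 0) + pvDiffs (b :: t)
  | _ => 0

theorem pvDiffs_nil : pvDiffs [] = 0 := rfl
theorem pvDiffs_single (a : Int) : pvDiffs [a] = 0 := rfl
theorem pvDiffs_cons₂ (a b : Int) (t : List Int) :
    pvDiffs (a :: b :: t) = (if b ≠ a then 1 else 0) + pvDiffs (b :: t) := rfl

-- lookup in a dict whose items are base ++ [(n, c)] with n absent from base
theorem getD_mk_append (base : List (Int × Int)) (n c : Int)
    (hb : ∀ p ∈ base, p.1 ≠ n) :
    (PySem.Dict.mk (base ++ [(n, c)])).getD n 0 = c := by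
  induction base with
  | nil =>
    rw [PySem.Dict.getD_eq_get?_getD]
    simp [PySem.Dict.get?_mk_cons]
  | cons p base ih =>
    obtain ⟨pk, pv⟩ := p
    have hp : pk ≠ n := hb (pk, pv) (by simp)
    rw [PySem.Dict.getD_eq_get?_getD]
    simp only [List.cons_append, PySem.Dict.get?_mk_cons]
    rw [if_neg (by simpa using hp), ← PySem.Dict.getD_eq_get?_getD]
    exact ih (fun q hq => hb q (by simp [hq]))

-- overwriting key n (present last, absent from base) keeps the layout
theorem insert_mk_append (base : List (Int × Int)) (n c v : Int)
    (hb : ∀ p ∈ base, p.1 ≠ n) :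
    (PySem.Dict.mk (base ++ [(n, c)])).insert n v = PySem.Dict.mk (base ++ [(n, v)]) := by
  apply PySem.Dict.ext
  have hc : (PySem.Dict.mk (base ++ [(n, c)])).contains n = true := by
    rw [PySem.Dict.contains_eq_decide_mem_keys]
    simp [PySem.Dict.keys]
  rw [PySem.Dict.items_insert_of_contains _ _ hc]
  show (base ++ [(n, c)]).map _ = base ++ [(n, v)]
  rw [List.map_append]
  congr 1
  · conv_rhs => rw [← List.map_id base]
    apply List.map_congr_left
    intro p hp
    simp [hb p hp]
  · simp

-- inserting a fresh key appends
theorem insert_mk_fresh (base : List (Int × Int)) (n v : Int)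
    (hb : ∀ p ∈ base, p.1 ≠ n) :
    (PySem.Dict.mk base).insert n v = PySem.Dict.mk (base ++ [(n, v)]) := by
  apply PySem.Dict.ext
  have hc : (PySem.Dict.mk base).contains n = false := by
    rw [PySem.Dict.contains_eq_decide_mem_keys]
    simp only [decide_eq_false_iff_not, PySem.Dict.keys]
    intro hmem
    obtain ⟨p, hp, hfst⟩ := List.mem_map.mp hmem
    exact hb p hp hfst
  rw [PySem.Dict.items_insert_of_not_contains _ _ hc]

-- A's inner loop: counts cond over l into the last slot
theorem inner_fold (cond : Int → Prop) [DecidablePred cond] (l : List Int)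
    (base : List (Int × Int)) (n c : Int) (hb : ∀ p ∈ base, p.1 ≠ n) :
    (l.foldl
      (fun (t : PySem.Dict Int Int) i =>
        if cond i then t.insert n (t.getD n 0 + 1) else t)
      (PySem.Dict.mk (base ++ [(n, c)])))
    = PySem.Dict.mk (base ++ [(n, c + (l.countP (fun i => decide (cond i)) : Int))]) := by
  induction l generalizing c with
  | nil => simp
  | cons i l ih =>
    simp only [List.foldl_cons]
    by_cases hi : cond i
    · rw [if_pos hi, getD_mk_append base n c hb, insert_mk_append base n c (c + 1) hb, ih]
      rw [List.countP_cons_of_pos (p := fun i => decide (cond i)) (l := l) (by simpa using hi)]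
      have harith : c + 1 + ((l.countP (fun i => decide (cond i)) : Nat) : Int)
          = c + ((l.countP (fun i => decide (cond i)) + 1 : Nat) : Int) := by push_cast; ring
      rw [harith]
    · rw [if_neg hi, ih]
      rw [List.countP_cons_of_neg (p := fun i => decide (cond i)) (by simpa using hi)]

-- the index-based count over one column equals pvDiffs
theorem countP_range_eq_pvDiffs (col : List Int) :
    (List.range (col.length - 1)).countP
      (fun k => decide (col.getD (k + 1) 0 ≠ col.getD k 0)) = pvDiffs col := by
  cases col with
  | nil => simp [pvDiffs_nil]
  | cons a t =>
    induction t generalizing a with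
    | nil => simp [pvDiffs_single]
    | cons b t ih =>
      show (List.range (t.length + 1)).countP _ = _
      rw [List.range_succ_eq_map, List.countP_cons, List.countP_map]
      have h0 : ((a :: b :: t).getD 1 0 : Int) = b := rfl
      have h00 : ((a :: b :: t).getD 0 0 : Int) = a := rfl
      have hshift : ∀ k : Nat,
          ((fun k => decide ((a :: b :: t).getD (k + 1) 0 ≠ (a :: b :: t).getD k 0)) ∘ (· + 1)) k
          = (fun k => decide ((b :: t).getD (k + 1) 0 ≠ (b :: t).getD k 0)) k := by
        intro k; rfl
      rw [List.countP_congr (fun k _ => by rw [hshift k])]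
      have ih' := ih b
      simp only [List.length_cons, Nat.add_sub_cancel] at ih'
      rw [ih', pvDiffs_cons₂]
      simp only [show (0 + 1 : Nat) = 1 from rfl, h0, h00]
      by_cases hba : b = a
      · simp [hba]
      · simp [hba]
        omega

-- inner count with pyRange/pyGetD indexing equals pvDiffs
theorem countP_pyRange_eq_pvDiffs (col : List Int) :
    ((PySem.List.pyRange 1 (PySem.List.len col) 1).countP
      (fun i => decide (PySem.List.pyGetD col i 0 ≠ PySem.List.pyGetD col (i - 1) 0)))
    = pvDiffs col := by
  rw [PySem.List.pyRange_one, List.countP_map]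
  have hlen : ((PySem.List.len col : Int) - 1).toNat = col.length - 1 := by
    simp [PySem.List.len_eq]
  rw [hlen, ← countP_range_eq_pvDiffs col]
  apply List.countP_congr
  intro k _
  simp only [Function.comp_apply]
  have h1 : (1 : Int) + (k : Int) = ((k + 1 : Nat) : Int) := by push_cast; ring
  rw [h1]
  have h2 : ((k + 1 : Nat) : Int) - 1 = ((k : Nat) : Int) := by push_cast; ring
  rw [h2]
  simp only [PySem.List.pyGetD_natCast]

-- A's outer loop invariant
theorem outer_fold (cols : List (List Int)) (m : Nat) :
    (List.map (fun k => (0 : Int) + (k : Nat)) (List.range m)).foldl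
      (fun (trans : PySem.Dict Int Int) n =>
        let col := PySem.List.pyGetD cols n []
        let trans := trans.insert n 0
        (PySem.List.pyRange 1 (PySem.List.len col) 1).foldl
          (fun t i =>
            let prev := PySem.List.pyGetD col (i - 1) 0
            let current := PySem.List.pyGetD col i 0
            if current ≠ prev then t.insert n (t.getD n 0 + 1) else t)
          trans)
      PySem.Dict.empty
    = PySem.Dict.mk ((List.range m).map
        (fun (k : Nat) => ((k : Int), (pvDiffs (PySem.List.pyGetD cols (k : Int) []) : Int)))) := by
  induction m with
  | zero => rfl
  | succ m ih =>
    rw [List.range_succ, List.map_append, List.foldl_append, ih]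
    simp only [List.map_cons, List.map_nil, List.foldl_cons, List.foldl_nil]
    set base := (List.range m).map
      (fun (k : Nat) => ((k : Int), (pvDiffs (PySem.List.pyGetD cols (k : Int) []) : Int))) with hbase
    have hb : ∀ p ∈ base, p.1 ≠ ((0 : Int) + (m : Int)) := by
      intro p hp
      rw [hbase] at hp
      obtain ⟨k, hk, rfl⟩ := List.mem_map.mp hp
      have : k < m := List.mem_range.mp hk
      simp only []
      intro h
      omega
    rw [insert_mk_fresh base _ 0 hb]
    rw [inner_fold (fun i => PySem.List.pyGetD (PySem.List.pyGetD cols ((0:Int) + m) []) i 0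
          ≠ PySem.List.pyGetD (PySem.List.pyGetD cols ((0:Int) + m) []) (i - 1) 0) _ base _ 0 hb]
    rw [countP_pyRange_eq_pvDiffs]
    congr 1
    rw [hbase, List.map_append, List.map_cons, List.map_nil]
    congr 2
    simp

-- zip of a mapped list with the list itself
theorem zip_self_map {α β : Type} (f : α → β) (l : List α) :
    (l.map f).zip l = l.map (fun x => (f x, x)) := by
  induction l with
  | nil => rfl
  | cons a t ih => simp [ih]

-- B-side: one level of the sweep advances every column's take-prefix by one
theorem pvDiffs_take_succ (col : List Int) (m : Nat) :
    pvDiffs (col.take (m + 2))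
      = pvDiffs (col.take (m + 1))
        + (if m + 1 < col.length ∧ col.getD (m + 1) 0 ≠ col.getD m 0 then 1 else 0) := by
  induction col generalizing m with
  | nil => simp [pvDiffs_nil]
  | cons a t ih =>
    cases t with
    | nil =>
      simp [pvDiffs_single]
    | cons b t' =>
      cases m with
      | zero =>
        simp only [List.take_succ_cons, List.take_zero]
        by_cases hba : b = a <;> simp [pvDiffs_cons₂, pvDiffs_single, hba, List.getD]
      | succ m' =>
        simp only [List.take_succ_cons, pvDiffs_cons₂]
        have := ih (m := m')
        simp only [List.take_succ_cons] at this ⊢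
        rw [this]
        have hgd1 : (a :: b :: t').getD (m' + 1 + 1) 0 = (b :: t').getD (m' + 1) 0 := rfl
        have hgd2 : (a :: b :: t').getD (m' + 1) 0 = (b :: t').getD m' 0 := rfl
        simp only [List.length_cons, hgd1, hgd2]
        rw [← Nat.add_assoc]
        congr 1
        exact if_congr (and_congr_left' (by omega)) rfl rfl

-- B's row sweep invariant: after levels 1..m the counter vector holds prefix diff-counts
theorem row_sweep (cols : List (List Int)) (m : Nat) :
    ((List.range m).map (fun k => (1 : Int) + (k : Nat))).foldl
      (fun (counts : List Int) i =>
        (counts.zip cols).map (fun p =>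
          p.1 + (if i < PySem.List.len p.2 ∧
                    PySem.List.pyGetD p.2 i 0 ≠ PySem.List.pyGetD p.2 (i - 1) 0
                 then 1 else 0)))
      (List.replicate cols.length (0 : Int))
    = cols.map (fun col => (pvDiffs (col.take (m + 1)) : Int)) := by
  induction m with
  | zero =>
    rw [List.range_zero, List.map_nil, List.foldl_nil]
    induction cols with
    | nil => rfl
    | cons c cs ihc =>
      simp only [List.length_cons, List.replicate_succ, List.map_cons]
      rw [ihc]
      congr 1
      cases c <;> simp [pvDiffs_nil, pvDiffs_single]
  | succ m ih =>
    rw [List.range_succ, List.map_append, List.foldl_append, ih]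
    simp only [List.map_cons, List.map_nil, List.foldl_cons, List.foldl_nil]
    rw [zip_self_map (fun col => (pvDiffs (col.take (m + 1)) : Int)) cols, List.map_map]
    apply List.map_congr_left
    intro col _
    simp only [Function.comp_apply]
    have hi : (1 : Int) + (m : Nat) = ((m + 1 : Nat) : Int) := by push_cast; ring
    have hi' : ((m + 1 : Nat) : Int) - 1 = ((m : Nat) : Int) := by push_cast; ring
    rw [hi, hi']
    simp only [PySem.List.pyGetD_natCast, PySem.List.len_eq]
    rw [pvDiffs_take_succ col m]
    have hcond : ((m + 1 : Nat) : Int) < (col.length : Int) ↔ m + 1 < col.length := by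
      exact_mod_cast Iff.rfl
    by_cases h : m + 1 < col.length ∧ col.getD (m + 1) 0 ≠ col.getD m 0
    · rw [if_pos h, if_pos ⟨hcond.mpr h.1, h.2⟩]; push_cast; ring
    · rw [if_neg h, if_neg (fun hc => h ⟨hcond.mp hc.1, hc.2⟩)]; push_cast; ring

-- every column length is at most (depth - 1).toNat + 1, where depth = max of lengths (default 0)
theorem len_le_depth (cols : List (List Int)) (col : List Int) (hmem : col ∈ cols) :
    col.length ≤ (((PySem.List.max? (cols.map PySem.List.len) (fun x => x)).getD 0 - 1).toNat + 1) := by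
  cases hmax : PySem.List.max? (cols.map PySem.List.len) (fun x => x) with
  | none =>
    rw [PySem.List.max?_eq_none_iff] at hmax
    rw [List.map_eq_nil_iff.mp hmax] at hmem
    exact absurd hmem (List.not_mem_nil)
  | some d =>
    have hle := PySem.List.max?_isMax hmax (PySem.List.len col)
      (List.mem_map_of_mem hmem)
    simp only [PySem.List.len_eq] at hle
    simp only [Option.getD_some]
    omega

-- ===== VERDICT (by name: the statement is the Claim_ definition above) =====
theorem cols2transition_spec : Claim_equal_cols2transition := by
  intro cols _
  unfold Spec_cols2transition cols2transition
  rw [PySem.List.pyRange_one 0 (PySem.List.len cols)]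
  have hlen : ((PySem.List.len cols : Int) - 0).toNat = cols.length := by
    simp [PySem.List.len_eq]
  rw [hlen, outer_fold cols cols.length]
  -- B side: zeta-reduce the let bindings
  have halt : cols2transition_alt cols
      = PySem.List.enumerate
          ((PySem.List.pyRange 1 ((PySem.List.max? (cols.map PySem.List.len) (fun x => x)).getD 0) 1).foldl
            (fun (counts : List Int) i =>
              (counts.zip cols).map (fun p =>
                p.1 + (if i < PySem.List.len p.2 ∧
                          PySem.List.pyGetD p.2 i 0 ≠ PySem.List.pyGetD p.2 (i - 1) 0
                       then 1 else 0)))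
            (List.replicate cols.length (0 : Int))) 0 := rfl
  rw [halt]
  rw [PySem.List.pyRange_one 1]
  set depth := (PySem.List.max? (cols.map PySem.List.len) (fun x => x)).getD 0 with hdepth
  rw [row_sweep cols (depth - 1).toNat]
  have hcounts : cols.map (fun col => (pvDiffs (col.take ((depth - 1).toNat + 1)) : Int))
      = cols.map (fun col => (pvDiffs col : Int)) := by
    apply List.map_congr_left
    intro col hcol
    rw [List.take_of_length_le (len_le_depth cols col hcol)]
  rw [hcounts]
  rw [PySem.List.enumerate_eq_map_pyRange (d := 0), PySem.List.pyRange_one 0, List.map_map]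
  have hlen2 : ((PySem.List.len (cols.map (fun col => (pvDiffs col : Int))) : Int) - 0).toNat
      = cols.length := by simp [PySem.List.len_eq]
  rw [hlen2]
  show (List.range cols.length).map _ = (List.range cols.length).map _
  apply List.map_congr_left
  intro k hk
  have hklt : k < cols.length := List.mem_range.mp hk
  simp only [Function.comp_apply]
  rw [show (0 : Int) + (k : Int) = ((k : Nat) : Int) by ring]
  simp only [PySem.List.pyGetD_natCast]
  congr 1
  rw [List.getD_eq_getElem _ _ (by simpa using hklt)]
  simp [List.getElem?_eq_getElem hklt]
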